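-- pv_equiv track=rewrite | github.com/vrapatel2002/luminos-os | archive/gtk4-ui/src/gui/bar/tray_widgets.py | get_battery_icon
-- ===== SOURCE A (Python) =====
-- _BATTERY_ICONS = [
--     (90, "🔋"),   # full
--     (70, "🔋"),   # high
--     (50, "🔋"),   # medium
--     (30, "🪫"),   # low
--     (15, "🪫"),   # warning
--     (0,  "🪫"),   # critical
-- ]
--
-- _BATTERY_CHARGING_ICON = "⚡🔋"
--
-- def get_battery_icon(percent: int | None, charging: bool = False) -> str:
--     """Return battery icon character for the given percentage."""
--     if charging:
--         return _BATTERY_CHARGING_ICON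
--     if percent is None:
--         return "🔋"
--     for threshold, icon in _BATTERY_ICONS:
--         if percent >= threshold:
--             return icon
--     return "🪫"
-- ===== SOURCE B (Python) =====
-- def get_battery_icon(percent, charging=False):
--     """Return battery icon character for the given percentage."""
--     if charging:
--         return "\u26a1\U0001F50B"
--     if percent is None:
--         return "\U0001F50B"
--     return "\U0001F50B" if percent >= 50 else "\U0001FAAB"
-- ===== Notes on version B (the rewrite author's own statement) =====
-- stated objective: simpler
-- what changed: Replaces the scan over the _BATTERY_ICONS threshold table (and the table itself) with a single closed-form comparison percent >= 50, since all thresholds >= 50 map to the full icon and all others to the empty icon.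
import Mathlib
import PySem

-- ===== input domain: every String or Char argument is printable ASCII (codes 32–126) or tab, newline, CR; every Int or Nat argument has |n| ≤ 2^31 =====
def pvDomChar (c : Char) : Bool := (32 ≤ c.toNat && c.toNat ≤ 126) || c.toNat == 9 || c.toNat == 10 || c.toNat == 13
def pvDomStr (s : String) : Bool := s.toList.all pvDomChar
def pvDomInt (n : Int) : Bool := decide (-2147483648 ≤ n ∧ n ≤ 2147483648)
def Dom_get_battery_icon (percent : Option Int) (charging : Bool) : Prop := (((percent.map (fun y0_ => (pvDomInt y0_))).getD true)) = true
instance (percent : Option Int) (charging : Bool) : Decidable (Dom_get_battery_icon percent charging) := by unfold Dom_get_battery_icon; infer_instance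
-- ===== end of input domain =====

-- B replaces A's threshold-table scan with one closed-form comparison (percent >= 50); simpler, same values.

-- ===== PORT A =====
def pvBatteryIcons : List (Int × String) :=
  [(90, "🔋"), (70, "🔋"), (50, "🔋"), (30, "🪫"), (15, "🪫"), (0, "🪫")]

-- the 'for threshold, icon in _BATTERY_ICONS' loop with early return
def pvBatteryLoop (percent : Int) : List (Int × String) → String
  | [] => "🪫"
  | (threshold, icon) :: rest =>
      if percent ≥ threshold then icon else pvBatteryLoop percent rest

def get_battery_icon (percent : Option Int) (charging : Bool) : String :=
  if charging then "⚡🔋"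
  else match percent with
    | none => "🔋"
    | some p => pvBatteryLoop p pvBatteryIcons

-- ===== PORT B =====
def get_battery_icon_alt (percent : Option Int) (charging : Bool) : String :=
  if charging then "⚡🔋"
  else match percent with
    | none => "🔋"
    | some p => if p ≥ 50 then "🔋" else "🪫"

-- ===== PRECONDITION & SPEC =====
def Spec_get_battery_icon (percent : Option Int) (charging : Bool) (out : String) : Prop := out = get_battery_icon_alt percent charging
instance (percent : Option Int) (charging : Bool) (out : String) : Decidable (Spec_get_battery_icon percent charging out) := by unfold Spec_get_battery_icon; infer_instance

-- ===== CLAIM (what is proved, stated in full; the proofs are below) =====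
def Claim_equal_get_battery_icon : Prop := ∀ (percent : Option Int) (charging : Bool), Dom_get_battery_icon percent charging → Spec_get_battery_icon percent charging (get_battery_icon percent charging)

-- ===== LEMMAS AND PROOFS =====
theorem pvBatteryLoop_eq (p : Int) :
    pvBatteryLoop p pvBatteryIcons = if p ≥ 50 then "🔋" else "🪫" := by
  simp only [pvBatteryIcons, pvBatteryLoop]
  split_ifs <;> first | rfl | omega

-- ===== VERDICT (by name: the statement is the Claim_ definition above) =====
theorem get_battery_icon_spec : Claim_equal_get_battery_icon := by
  intro percent charging _
  unfold Spec_get_battery_icon get_battery_icon get_battery_icon_alt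
  cases percent <;> simp [pvBatteryLoop_eq]
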